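-- pv_equiv track=rewrite | github.com/artak-kirakosyan/money-pro-analyzer | money_pro_plot/plot_helper.py | fill_in_empty_dates
-- ===== SOURCE A (Python) =====
-- from typing import List, Tuple, Any
--
-- def fill_in_empty_dates(dates: List[Tuple[int, int]], amounts: List[Any]):
--     # TODO fix me idiot
--     years = [i[0] for i in dates]
--     min_year = min(years)
--     max_year = max(years)
--     filled_dates = []
--     filled_amounts = []
--     for year in range(min_year, max_year + 1):
--         for month in range(1, 13):
--             if (year, month) in dates:
--                 filled_amounts.append(amounts[dates.index((year, month))])
--             else:
--                 filled_amounts.append(0)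
--             filled_dates.append((year, month))
--
--     return filled_dates, filled_amounts
-- ===== SOURCE B (Python) =====
-- def fill_in_empty_dates(dates, amounts):
--     min_year = min(y for y, _ in dates)
--     max_year = max(y for y, _ in dates)
--     filled_dates = [(y, m) for y in range(min_year, max_year + 1)
--                     for m in range(1, 13)]
--     filled_amounts = [0] * len(filled_dates)
--     seen = set()
--     for idx, (y, m) in enumerate(dates):
--         if (y, m) in seen:
--             continue
--         seen.add((y, m))
--         if 1 <= m <= 12:
--             filled_amounts[(y - min_year) * 12 + (m - 1)] = amounts[idx]
--     return filled_dates, filled_amounts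
-- ===== Notes on version B (the rewrite author's own statement) =====
-- stated objective: faster
-- what changed: A scans the whole dates list (membership test plus dates.index) for every cell of the year/month grid; B builds the zero-filled grid once and makes a single enumerate pass over dates, scattering each first-occurrence amount into its computed slot (year-min_year)*12+(month-1).
import Mathlib
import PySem

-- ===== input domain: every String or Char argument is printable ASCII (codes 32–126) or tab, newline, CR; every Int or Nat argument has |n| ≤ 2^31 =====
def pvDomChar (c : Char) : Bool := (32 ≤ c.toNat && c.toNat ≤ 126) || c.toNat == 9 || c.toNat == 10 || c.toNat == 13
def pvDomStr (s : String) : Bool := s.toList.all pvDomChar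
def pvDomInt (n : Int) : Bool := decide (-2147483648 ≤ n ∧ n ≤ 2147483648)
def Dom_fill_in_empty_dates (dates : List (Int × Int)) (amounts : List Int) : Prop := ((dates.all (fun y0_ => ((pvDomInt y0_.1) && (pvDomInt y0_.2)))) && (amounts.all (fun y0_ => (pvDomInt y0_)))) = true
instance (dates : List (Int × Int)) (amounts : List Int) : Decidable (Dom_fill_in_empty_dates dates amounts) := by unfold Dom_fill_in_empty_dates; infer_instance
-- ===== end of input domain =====

-- B replaces A's per-grid-cell scan of dates (membership + dates.index) by one zero-filled
-- grid plus a single scatter pass over dates (first occurrence wins); measured faster (asymptotic).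


-- ===== PORT A =====
-- literal transliteration of A: min/max of the years (empty list raises → Pre_),
-- then for each (year, month) of the grid test membership in dates and read
-- amounts[dates.index((year, month))] (amounts.getD: the out-of-range IndexError is excluded by Pre_).
def fill_in_empty_dates (dates : List (Int × Int)) (amounts : List Int) : (List (Int × Int)) × List Int :=
  let years := dates.map (fun i => i.1)
  match PySem.List.min? years (fun x => x), PySem.List.max? years (fun x => x) with
  | some min_year, some max_year =>
      (PySem.List.pyRange min_year (max_year + 1) 1).foldl (fun st year =>
        (PySem.List.pyRange 1 13 1).foldl (fun st month =>
          let fa := if (year, month) ∈ dates then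
              st.2 ++ [amounts.getD (dates.idxOf (year, month)) 0]
            else
              st.2 ++ [0]
          (st.1 ++ [(year, month)], fa)) st) (([] : List (Int × Int)), ([] : List Int))
  | _, _ => ([], [])  -- unreachable under Pre_ (Python raises ValueError on empty dates)

-- ===== PORT B =====
-- B-side helper: the grid comprehension [(y, m) for y in range(lo, hi) for m in range(1, 13)]
def pvGrid (lo hi : Int) : List (Int × Int) :=
  (PySem.List.pyRange lo hi 1).flatMap (fun y => (PySem.List.pyRange 1 13 1).map (fun m => (y, m)))

-- literal transliteration of B (Source B): build the grid and an all-zero amounts list,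
-- then one enumerate pass over dates scattering amounts[idx] into slot (y-min)*12+(m-1)
-- for each not-yet-seen (y, m) with a valid month (amounts.getD / List.set: the
-- IndexError sites are excluded by Pre_; the written slot index is provably in range there).
def fill_in_empty_dates_alt (dates : List (Int × Int)) (amounts : List Int) : (List (Int × Int)) × List Int :=
  let years := dates.map (fun i => i.1)
  match PySem.List.min? years (fun x => x) with
  | none => ([], [])  -- unreachable under Pre_ (Python raises ValueError on empty dates)
  | some min_year =>
    match PySem.List.max? years (fun x => x) with
    | none => ([], [])  -- unreachable under Pre_
    | some max_year =>
      let filled_dates := pvGrid min_year (max_year + 1)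
      let res := (PySem.List.enumerate dates 0).foldl
        (fun (st : List Int × PySem.Set (Int × Int)) p =>
          if p.2 ∈ st.2 then st
          else
            let seen := PySem.Set.add st.2 p.2
            if 1 ≤ p.2.2 ∧ p.2.2 ≤ 12 then
              (st.1.set ((p.2.1 - min_year) * 12 + (p.2.2 - 1)).toNat (amounts.getD p.1.toNat 0), seen)
            else (st.1, seen))
        (List.replicate filled_dates.length 0, PySem.Set.ofList [])
      (filled_dates, res.1)

-- ===== PRECONDITION & SPEC =====
-- Pre_ excludes exactly the inputs where A raises: the empty dates list (ValueError from min)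
-- and inputs where some first occurrence of a grid date sits past the end of amounts (IndexError).
def Pre_fill_in_empty_dates (dates : List (Int × Int)) (amounts : List Int) : Prop :=
  dates ≠ [] ∧ ∀ p ∈ dates, 1 ≤ p.2 ∧ p.2 ≤ 12 → dates.idxOf p < amounts.length
instance (dates : List (Int × Int)) (amounts : List Int) : Decidable (Pre_fill_in_empty_dates dates amounts) := by unfold Pre_fill_in_empty_dates; infer_instance

def pvWitness_fill_in_empty_dates : (List (Int × Int)) × List Int := ([(2020, 11), (2021, 2)], [5, -3])

def Spec_fill_in_empty_dates (dates : List (Int × Int)) (amounts : List Int) (out : (List (Int × Int)) × List Int) : Prop := out = fill_in_empty_dates_alt dates amounts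
instance (dates : List (Int × Int)) (amounts : List Int) (out : (List (Int × Int)) × List Int) : Decidable (Spec_fill_in_empty_dates dates amounts out) := by unfold Spec_fill_in_empty_dates; infer_instance

-- ===== CLAIM (what is proved, stated in full; the proofs are below) =====
def Claim_equal_fill_in_empty_dates : Prop := ∀ (dates : List (Int × Int)) (amounts : List Int), Dom_fill_in_empty_dates dates amounts → Pre_fill_in_empty_dates dates amounts → Spec_fill_in_empty_dates dates amounts (fill_in_empty_dates dates amounts)

-- ===== LEMMAS AND PROOFS =====

theorem pvGrid_cons (lo hi : Int) (h : lo < hi) :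
    pvGrid lo hi = (PySem.List.pyRange 1 13 1).map (fun m => (lo, m)) ++ pvGrid (lo + 1) hi := by
  unfold pvGrid
  rw [PySem.List.pyRange_one_cons h, List.flatMap_cons]

theorem pvGrid_nil (lo hi : Int) (h : hi ≤ lo) : pvGrid lo hi = [] := by
  unfold pvGrid
  rw [PySem.List.pyRange_one_eq_nil h, List.flatMap_nil]

theorem pvGrid_mem (lo hi : Int) (p : Int × Int) :
    p ∈ pvGrid lo hi ↔ lo ≤ p.1 ∧ p.1 < hi ∧ 1 ≤ p.2 ∧ p.2 < 13 := by
  unfold pvGrid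
  cases p with
  | mk y m =>
    simp [List.mem_flatMap, PySem.List.mem_pyRange_one]
    tauto

theorem pvGrid_length (lo hi : Int) : (pvGrid lo hi).length = 12 * (hi - lo).toNat := by
  by_cases h : lo < hi
  · have : (hi - (lo+1)).toNat + 1 = (hi - lo).toNat := by omega
    rw [pvGrid_cons lo hi h, List.length_append, List.length_map,
        PySem.List.length_pyRange_one, pvGrid_length (lo+1) hi]
    omega
  · rw [pvGrid_nil lo hi (by omega)]
    simp; omega
termination_by (hi - lo).toNat
decreasing_by omega

theorem pvGrid_slot (lo hi y m : Int) (h1 : lo ≤ y) (h2 : y < hi) (h3 : 1 ≤ m) (h4 : m < 13) :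
    (pvGrid lo hi)[((y - lo) * 12 + (m - 1)).toNat]? = some (y, m) := by
  rw [pvGrid_cons lo hi (by omega)]
  by_cases hy : y = lo
  · subst hy
    have hidx : ((y - y) * 12 + (m - 1)).toNat = (m - 1).toNat := by omega
    rw [hidx, List.getElem?_append_left (by simp [PySem.List.length_pyRange_one]; omega)]
    rw [List.getElem?_map, PySem.List.getElem?_pyRange_one]
    simp
    omega
  · have hlen : ((PySem.List.pyRange 1 13 1).map (fun m => (lo, m))).length = 12 := by
      simp [PySem.List.length_pyRange_one]
    have hge : 12 ≤ ((y - lo) * 12 + (m - 1)).toNat := by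
      have : 1 ≤ y - lo := by omega
      omega
    rw [List.getElem?_append_right (by rw [hlen]; exact hge), hlen]
    have hidx : ((y - lo) * 12 + (m - 1)).toNat - 12 = ((y - (lo+1)) * 12 + (m - 1)).toNat := by omega
    rw [hidx]
    exact pvGrid_slot (lo+1) hi y m (by omega) h2 h3 h4
termination_by (hi - lo).toNat
decreasing_by omega

theorem pvGrid_nodup (lo hi : Int) : (pvGrid lo hi).Nodup := by
  by_cases h : lo < hi
  · rw [pvGrid_cons lo hi h]
    refine List.Nodup.append ?_ (pvGrid_nodup (lo+1) hi) ?_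
    · exact (PySem.List.nodup_pyRange_one 1 13).map (fun a b hab => by
        simpa using congrArg Prod.snd hab)
    · intro p hp hp'
      rw [pvGrid_mem] at hp'
      simp [List.mem_map, PySem.List.mem_pyRange_one] at hp
      obtain ⟨mm, _, rfl⟩ := hp
      simp at hp'
  · rw [pvGrid_nil lo hi (by omega)]; exact List.nodup_nil
termination_by (hi - lo).toNat
decreasing_by omega

def pvVal (dates : List (Int × Int)) (amounts : List Int) (p : Int × Int) : Int :=
  if p ∈ dates then amounts.getD (dates.idxOf p) 0 else 0

def pvF (dates : List (Int × Int)) (amounts : List Int) (pre : List (Int × Int)) (q : Int × Int) : Int :=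
  if q ∈ pre ∧ 1 ≤ q.2 ∧ q.2 ≤ 12 then amounts.getD (dates.idxOf q) 0 else 0

-- generic nodup set-on-map lemma
theorem pv_set_map {α β : Type} [DecidableEq α] (l : List α) (hnd : l.Nodup) (i : Nat)
    (hi : i < l.length) (f : α → β) (v : β) :
    (l.map f).set i v = l.map (fun q => if q = l[i] then v else f q) := by
  apply List.ext_getElem
  · simp
  · intro j hj hj'
    simp only [List.getElem_set, List.getElem_map]
    by_cases hji : i = j
    · subst hji
      simp
    · simp only [if_neg hji]
      have hjl : j < l.length := by simpa using hj
      have : l[j] ≠ l[i] := by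
        intro he
        exact hji (hnd.getElem_inj_iff.mp he).symm
      simp [this]

theorem pv_idxOf_append {α : Type} [BEq α] [LawfulBEq α] (pre rest : List α) (p : α) (hp : p ∉ pre) :
    (pre ++ p :: rest).idxOf p = pre.length := by
  rw [List.idxOf_append, if_neg hp]
  simp

-- A-side inner loop
theorem pvA_inner (dates : List (Int × Int)) (amounts : List Int) (year : Int) :
    ∀ (ms : List Int) (st : List (Int × Int) × List Int),
      ms.foldl (fun st month =>
          let fa := if (year, month) ∈ dates then
              st.2 ++ [amounts.getD (dates.idxOf (year, month)) 0]
            else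
              st.2 ++ [0]
          (st.1 ++ [(year, month)], fa)) st
        = (st.1 ++ ms.map (fun m => (year, m)),
           st.2 ++ ms.map (fun m => pvVal dates amounts (year, m))) := by
  intro ms
  induction ms with
  | nil => intro st; simp
  | cons m t ih =>
    intro st
    rw [List.foldl_cons, ih]
    by_cases h : (year, m) ∈ dates <;> simp [pvVal, h]

theorem pvA_outer (dates : List (Int × Int)) (amounts : List Int) :
    ∀ (ys : List Int) (st : List (Int × Int) × List Int),
      ys.foldl (fun st year =>
        (PySem.List.pyRange 1 13 1).foldl (fun st month =>
          let fa := if (year, month) ∈ dates then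
              st.2 ++ [amounts.getD (dates.idxOf (year, month)) 0]
            else
              st.2 ++ [0]
          (st.1 ++ [(year, month)], fa)) st) st
      = (st.1 ++ ys.flatMap (fun y => (PySem.List.pyRange 1 13 1).map (fun m => (y, m))),
         st.2 ++ (ys.flatMap (fun y => (PySem.List.pyRange 1 13 1).map (fun m => (y, m)))).map
                   (pvVal dates amounts)) := by
  intro ys
  induction ys with
  | nil => intro st; simp
  | cons y t ih =>
    intro st
    rw [List.foldl_cons, pvA_inner, ih]
    simp [List.map_map, Function.comp]

theorem pvB_loop (dates : List (Int × Int)) (amounts : List Int) (a b : Int)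
    (hlo : ∀ p ∈ dates, a ≤ p.1) (hhi : ∀ p ∈ dates, p.1 ≤ b) :
    ∀ (rest pre : List (Int × Int)) (seen : PySem.Set (Int × Int)),
      dates = pre ++ rest →
      (∀ q, q ∈ seen ↔ q ∈ pre) →
      ((PySem.List.enumerate rest (pre.length : Int)).foldl
        (fun (st : List Int × PySem.Set (Int × Int)) p =>
          if p.2 ∈ st.2 then st
          else
            let seen := PySem.Set.add st.2 p.2
            if 1 ≤ p.2.2 ∧ p.2.2 ≤ 12 then
              (st.1.set ((p.2.1 - a) * 12 + (p.2.2 - 1)).toNat (amounts.getD p.1.toNat 0), seen)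
            else (st.1, seen))
        ((pvGrid a (b + 1)).map (pvF dates amounts pre), seen)).1
      = (pvGrid a (b + 1)).map (pvF dates amounts dates) := by
  intro rest
  induction rest with
  | nil =>
    intro pre seen hsplit hseen
    simp at hsplit
    subst hsplit
    simp [PySem.List.enumerate_nil]
  | cons p t ih =>
    intro pre seen hsplit hseen
    rw [PySem.List.enumerate_cons, List.foldl_cons]
    by_cases hp : p ∈ pre
    · -- already seen: state unchanged, extend pre
      rw [if_pos ((hseen p).mpr hp)]
      have hmap : pvF dates amounts pre = pvF dates amounts (pre ++ [p]) := by
        funext q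
        simp only [pvF, List.mem_append, List.mem_singleton]
        by_cases hq : q = p
        · subst hq; simp [hp]
        · simp [hq]
      have hlen : ((pre ++ [p]).length : Int) = (pre.length : Int) + 1 := by simp
      rw [hmap, show ((pre.length : Int) + 1) = (((pre ++ [p]).length : Int)) by simp]
      exact ih (pre ++ [p]) seen (by simpa using hsplit)
        (fun q => by
          rw [hseen q]
          simp only [List.mem_append, List.mem_singleton]
          constructor
          · exact Or.inl
          · rintro (h | rfl)
            · exact h
            · exact hp)
    · rw [if_neg (fun h => hp ((hseen p).mp h))]
      have hpd : p ∈ dates := by rw [hsplit]; simp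
      have hseen' : ∀ q, q ∈ PySem.Set.add seen p ↔ q ∈ pre ++ [p] := by
        intro q
        rw [PySem.Set.mem_add]
        simp [hseen q]
      have hidx : dates.idxOf p = pre.length := by
        rw [hsplit]; exact pv_idxOf_append pre t p hp
      by_cases hv : 1 ≤ p.2 ∧ p.2 ≤ 12
      · rw [if_pos hv]
        have ha := hlo p hpd
        have hb := hhi p hpd
        have hslot : (pvGrid a (b + 1))[((p.1 - a) * 12 + (p.2 - 1)).toNat]? = some p := by
          have := pvGrid_slot a (b + 1) p.1 p.2 ha (by omega) hv.1 (by omega)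
          simpa using this
        have hlt : ((p.1 - a) * 12 + (p.2 - 1)).toNat < (pvGrid a (b + 1)).length :=
          (List.getElem?_eq_some_iff.mp hslot).1
        have hget : (pvGrid a (b + 1))[((p.1 - a) * 12 + (p.2 - 1)).toNat]'hlt = p := by
          have := (List.getElem?_eq_some_iff.mp hslot).2
          exact this
        have hset := pv_set_map (pvGrid a (b + 1)) (pvGrid_nodup a (b + 1))
          (((p.1 - a) * 12 + (p.2 - 1)).toNat) hlt (pvF dates amounts pre)
          (amounts.getD ((pre.length : Int)).toNat 0)
        rw [hset]
        have hfun : (fun q => if q = (pvGrid a (b + 1))[((p.1 - a) * 12 + (p.2 - 1)).toNat]'hlt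
                        then amounts.getD ((pre.length : Int)).toNat 0
                        else pvF dates amounts pre q)
            = pvF dates amounts (pre ++ [p]) := by
          funext q
          rw [hget]
          by_cases hq : q = p
          · subst hq
            simp [pvF, hv, hidx]
          · simp [pvF, hq]
        rw [hfun, show ((pre.length : Int) + 1) = (((pre ++ [p]).length : Int)) by simp]
        exact ih (pre ++ [p]) _ (by simpa using hsplit) hseen'
      · rw [if_neg hv]
        have hmap : pvF dates amounts pre = pvF dates amounts (pre ++ [p]) := by
          funext q
          simp only [pvF, List.mem_append, List.mem_singleton]
          by_cases hq : q = p
          · subst hq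
            rw [if_neg (fun h => hv h.2), if_neg (fun h => hv h.2)]
          · simp [hq]
        rw [hmap, show ((pre.length : Int) + 1) = (((pre ++ [p]).length : Int)) by simp]
        exact ih (pre ++ [p]) _ (by simpa using hsplit) hseen'

theorem pv_map_F_eq_val (dates : List (Int × Int)) (amounts : List Int) (a b : Int) :
    (pvGrid a b).map (pvF dates amounts dates) = (pvGrid a b).map (pvVal dates amounts) := by
  apply List.map_congr_left
  intro q hq
  have hm := (pvGrid_mem a b q).mp hq
  by_cases hd : q ∈ dates
  · simp [pvF, pvVal, hd, hm.2.2.1, show q.2 ≤ 12 by omega]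
  · simp [pvF, pvVal, hd]

theorem pv_replicate_eq_map (dates : List (Int × Int)) (amounts : List Int) (a b : Int) :
    List.replicate (pvGrid a b).length 0 = (pvGrid a b).map (pvF dates amounts []) := by
  have : pvF dates amounts [] = fun _ => (0 : Int) := by
    funext q; simp [pvF]
  rw [this, List.map_const']

-- ===== VERDICT (by name: the statement is the Claim_ definition above) =====
theorem fill_in_empty_dates_spec : Claim_equal_fill_in_empty_dates := by
  intro dates amounts _ hpre
  obtain ⟨hne, -⟩ := hpre
  unfold Spec_fill_in_empty_dates
  cases hmin : PySem.List.min? (dates.map (fun i => i.1)) (fun x => x) with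
  | none =>
    exact absurd (List.map_eq_nil_iff.mp ((PySem.List.min?_eq_none_iff _ _).mp hmin)) hne
  | some a =>
  cases hmax : PySem.List.max? (dates.map (fun i => i.1)) (fun x => x) with
  | none =>
    exact absurd (List.map_eq_nil_iff.mp ((PySem.List.max?_eq_none_iff _ _).mp hmax)) hne
  | some b =>
  have hlo : ∀ p ∈ dates, a ≤ p.1 := by
    intro p hp
    exact PySem.List.min?_isMin hmin p.1 (List.mem_map.mpr ⟨p, hp, rfl⟩)
  have hhi : ∀ p ∈ dates, p.1 ≤ b := by
    intro p hp
    exact PySem.List.max?_isMax hmax p.1 (List.mem_map.mpr ⟨p, hp, rfl⟩)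
  simp only [fill_in_empty_dates, fill_in_empty_dates_alt, hmin, hmax]
  rw [pvA_outer]
  rw [pv_replicate_eq_map dates amounts a (b + 1)]
  have hloop := pvB_loop dates amounts a b hlo hhi dates [] (PySem.Set.ofList [])
    (by simp) (by intro q; simp [PySem.Set.ofList])
  simp only [List.length_nil, Int.natCast_zero] at hloop
  rw [hloop, pv_map_F_eq_val]
  simp [pvGrid]
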